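-- pv_equiv track=rewrite | github.com/Charestlab/eegprep | eegprep/bids/naming.py | filename2tuple
-- ===== SOURCE A (Python) =====
-- BIDS_SEGMENTS = ['sub', 'ses', 'task', 'run']
--
-- def filename2tuple(fname):
--     segments = fname.split('_')
--     vals = [None] * len(BIDS_SEGMENTS)
--     for seg in segments:
--         for l in [3, 4]:
--             if seg[:l] in BIDS_SEGMENTS:
--                 vals[BIDS_SEGMENTS.index(seg[:l])] = seg[l+1:]
--     return tuple(vals)
-- ===== SOURCE B (Python) =====
-- BIDS_SEGMENTS = ['sub', 'ses', 'task', 'run']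
--
-- def filename2tuple(fname):
--     segments = fname.split('_')
--     vals = []
--     for key in BIDS_SEGMENTS:
--         L = len(key)
--         found = None
--         for seg in segments:
--             if seg[:L] == key:
--                 found = seg[L+1:]
--         vals.append(found)
--     return tuple(vals)
-- ===== Notes on version B (the rewrite author's own statement) =====
-- stated objective: alternative
-- what changed: B inverts the loop nesting: instead of a single pass over the filename segments dispatching each segment into a slot via list membership and index lookup, B iterates over the four known BIDS keys and for each key scans the segments for the last prefix match, building the result list key by key.
import Mathlib
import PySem

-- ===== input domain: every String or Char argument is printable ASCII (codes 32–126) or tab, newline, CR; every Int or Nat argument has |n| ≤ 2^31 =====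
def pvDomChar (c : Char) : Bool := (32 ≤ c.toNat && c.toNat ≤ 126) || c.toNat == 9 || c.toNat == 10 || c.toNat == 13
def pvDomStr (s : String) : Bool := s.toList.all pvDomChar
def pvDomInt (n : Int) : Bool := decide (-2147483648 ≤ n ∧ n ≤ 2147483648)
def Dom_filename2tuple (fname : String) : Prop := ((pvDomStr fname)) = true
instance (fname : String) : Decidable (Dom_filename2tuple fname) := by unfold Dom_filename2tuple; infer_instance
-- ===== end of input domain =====

-- B inverts the loop nesting (outer loop over the four BIDS keys, inner scan of the segments) instead of A's single segment pass with membership/index dispatch; same cost, alternative decomposition.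


-- ===== PORT A =====
-- BIDS_SEGMENTS = ['sub', 'ses', 'task', 'run']
def pvBIDS : List (List Char) := ["sub".toList, "ses".toList, "task".toList, "run".toList]

-- body of A's outer loop: for l in [3,4]: if seg[:l] in BIDS_SEGMENTS: vals[BIDS_SEGMENTS.index(seg[:l])] = seg[l+1:]
def pvAStep (vals : List (Option (List Char))) (seg : List Char) : List (Option (List Char)) :=
  [(3 : Int), 4].foldl (fun vals l =>
    let p := PySem.List.slice seg none (some l)
    if p ∈ pvBIDS then
      match PySem.List.index? pvBIDS p with
      | some i => vals.set i (some (PySem.List.slice seg (some (l + 1)) none))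
      | none => vals
    else vals) vals

def filename2tuple (fname : String) : Option String × Option String × Option String × Option String :=
  let segments := PySem.Chars.splitOn fname.toList ['_']
  let vals := segments.foldl pvAStep (List.replicate 4 none)
  ((vals.getD 0 none).map String.ofList, (vals.getD 1 none).map String.ofList,
   (vals.getD 2 none).map String.ofList, (vals.getD 3 none).map String.ofList)

-- ===== PORT B =====
-- body of B's inner loop: if seg[:L] == key: found = seg[L+1:]   (seg[:L] = take, seg[L+1:] = drop)
def pvKeyStep (key : List Char) (acc : Option (List Char)) (seg : List Char) : Option (List Char) :=
  if seg.take key.length = key then some (seg.drop (key.length + 1)) else acc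

-- for each key: scan all segments, last match wins, default None
def pvLastMatch (key : List Char) (segs : List (List Char)) : Option (List Char) :=
  segs.foldl (pvKeyStep key) none

def filename2tuple_alt (fname : String) : Option String × Option String × Option String × Option String :=
  let segs := PySem.Chars.splitOn fname.toList ['_']
  ((pvLastMatch "sub".toList segs).map String.ofList, (pvLastMatch "ses".toList segs).map String.ofList,
   (pvLastMatch "task".toList segs).map String.ofList, (pvLastMatch "run".toList segs).map String.ofList)

-- ===== PRECONDITION & SPEC =====
def Spec_filename2tuple (fname : String) (out : Option String × Option String × Option String × Option String) : Prop := out = filename2tuple_alt fname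
instance (fname : String) (out : Option String × Option String × Option String × Option String) : Decidable (Spec_filename2tuple fname out) := by unfold Spec_filename2tuple; infer_instance

-- ===== CLAIM (what is proved, stated in full; the proofs are below) =====
def Claim_equal_filename2tuple : Prop := ∀ (fname : String), Dom_filename2tuple fname → Spec_filename2tuple fname (filename2tuple fname)

-- ===== LEMMAS AND PROOFS =====

lemma pv_slice_take3 (seg : List Char) :
    PySem.List.slice seg none (some (3 : Int)) = seg.take 3 := by
  rw [PySem.List.slice_to seg (by norm_num : (0:Int) ≤ 3)]; rfl

lemma pv_slice_take4 (seg : List Char) :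
    PySem.List.slice seg none (some (4 : Int)) = seg.take 4 := by
  rw [PySem.List.slice_to seg (by norm_num : (0:Int) ≤ 4)]; rfl

lemma pv_slice_drop4 (seg : List Char) :
    PySem.List.slice seg (some ((3 : Int) + 1)) none = seg.drop 4 := by
  rw [PySem.List.slice_from seg (by norm_num : (0:Int) ≤ 3 + 1)]; rfl

lemma pv_slice_drop5 (seg : List Char) :
    PySem.List.slice seg (some ((4 : Int) + 1)) none = seg.drop 5 := by
  rw [PySem.List.slice_from seg (by norm_num : (0:Int) ≤ 4 + 1)]; rfl

lemma pv_eq_of_take_eq_short {seg k : List Char} {n : Nat} (h : seg.take n = k) (hk : k.length < n) :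
    seg = k := by
  have hl : (seg.take n).length = k.length := by rw [h]
  rw [List.length_take] at hl
  rw [← h]
  exact (List.take_of_length_le (by omega)).symm

lemma pv_take3_of_take4 (seg : List Char) : (seg.take 4).take 3 = seg.take 3 := by
  rw [List.take_take]; norm_num

lemma pv_idx_sub : List.idxOf? (['s','u','b'] : List Char)
    [['s','u','b'],['s','e','s'],['t','a','s','k'],['r','u','n']] = some 0 := by decide

lemma pv_idx_ses : List.idxOf? (['s','e','s'] : List Char)
    [['s','u','b'],['s','e','s'],['t','a','s','k'],['r','u','n']] = some 1 := by decide

lemma pv_idx_task : List.idxOf? (['t','a','s','k'] : List Char)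
    [['s','u','b'],['s','e','s'],['t','a','s','k'],['r','u','n']] = some 2 := by decide

lemma pv_idx_run : List.idxOf? (['r','u','n'] : List Char)
    [['s','u','b'],['s','e','s'],['t','a','s','k'],['r','u','n']] = some 3 := by decide

lemma pv_take3_ne_task (seg : List Char) : List.take 3 seg ≠ ['t','a','s','k'] := by
  intro h
  have := congrArg List.length h
  simp [List.length_take] at this
  omega

lemma pvAStep_eq (a b c d : Option (List Char)) (seg : List Char) :
    pvAStep [a, b, c, d] seg =
      [pvKeyStep "sub".toList a seg, pvKeyStep "ses".toList b seg,
       pvKeyStep "task".toList c seg, pvKeyStep "run".toList d seg] := by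
  simp only [pvAStep, pvKeyStep, pvBIDS, List.foldl,
    pv_slice_take3, pv_slice_take4, pv_slice_drop4, pv_slice_drop5]
  by_cases h1 : seg.take 3 = (['s','u','b'] : List Char)
  · by_cases h1' : seg.take 4 = (['s','u','b'] : List Char)
    · have hseg : seg = ['s','u','b'] := pv_eq_of_take_eq_short h1' (by decide)
      subst hseg
      simp [PySem.List.index?, pv_idx_sub]
    · have hns : seg.take 4 ≠ (['s','e','s'] : List Char) := by
        intro h; have e := pv_eq_of_take_eq_short h (by decide); rw [e] at h1; exact absurd h1 (by decide)
      have hnr : seg.take 4 ≠ (['r','u','n'] : List Char) := by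
        intro h; have e := pv_eq_of_take_eq_short h (by decide); rw [e] at h1; exact absurd h1 (by decide)
      have hnt : seg.take 4 ≠ (['t','a','s','k'] : List Char) := by
        intro h
        have ht : seg.take 3 = ['t','a','s'] := by rw [← pv_take3_of_take4, h]; decide
        rw [h1] at ht; exact absurd ht (by decide)
      simp [PySem.List.index?, pv_idx_sub, h1, h1', hns, hnr, hnt]
  · by_cases h2 : seg.take 3 = (['s','e','s'] : List Char)
    · by_cases h2' : seg.take 4 = (['s','e','s'] : List Char)
      · have hseg : seg = ['s','e','s'] := pv_eq_of_take_eq_short h2' (by decide)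
        subst hseg
        simp [PySem.List.index?, pv_idx_ses]
      · have hns : seg.take 4 ≠ (['s','u','b'] : List Char) := by
          intro h; have e := pv_eq_of_take_eq_short h (by decide); rw [e] at h2; exact absurd h2 (by decide)
        have hnr : seg.take 4 ≠ (['r','u','n'] : List Char) := by
          intro h; have e := pv_eq_of_take_eq_short h (by decide); rw [e] at h2; exact absurd h2 (by decide)
        have hnt : seg.take 4 ≠ (['t','a','s','k'] : List Char) := by
          intro h
          have ht : seg.take 3 = ['t','a','s'] := by rw [← pv_take3_of_take4, h]; decide
          rw [h2] at ht; exact absurd ht (by decide)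
        simp [PySem.List.index?, pv_idx_ses, h2, h2', hns, hnr, hnt]
    · by_cases h3 : seg.take 3 = (['r','u','n'] : List Char)
      · by_cases h3' : seg.take 4 = (['r','u','n'] : List Char)
        · have hseg : seg = ['r','u','n'] := pv_eq_of_take_eq_short h3' (by decide)
          subst hseg
          simp [PySem.List.index?, pv_idx_run]
        · have hns : seg.take 4 ≠ (['s','u','b'] : List Char) := by
            intro h; have e := pv_eq_of_take_eq_short h (by decide); rw [e] at h3; exact absurd h3 (by decide)
          have hne : seg.take 4 ≠ (['s','e','s'] : List Char) := by
            intro h; have e := pv_eq_of_take_eq_short h (by decide); rw [e] at h3; exact absurd h3 (by decide)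
          have hnt : seg.take 4 ≠ (['t','a','s','k'] : List Char) := by
            intro h
            have ht : seg.take 3 = ['t','a','s'] := by rw [← pv_take3_of_take4, h]; decide
            rw [h3] at ht; exact absurd ht (by decide)
          simp [PySem.List.index?, pv_idx_run, h3, h3', hns, hne, hnt]
      · by_cases h4 : seg.take 4 = (['t','a','s','k'] : List Char)
        · have ht3 : seg.take 3 = ['t','a','s'] := by rw [← pv_take3_of_take4, h4]; decide
          simp [PySem.List.index?, pv_idx_task, h4, ht3]
        · have hns : seg.take 4 ≠ (['s','u','b'] : List Char) := by
            intro h; have e := pv_eq_of_take_eq_short h (by decide); rw [e] at h1; exact absurd h1 (by decide)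
          have hne : seg.take 4 ≠ (['s','e','s'] : List Char) := by
            intro h; have e := pv_eq_of_take_eq_short h (by decide); rw [e] at h2; exact absurd h2 (by decide)
          have hnr : seg.take 4 ≠ (['r','u','n'] : List Char) := by
            intro h; have e := pv_eq_of_take_eq_short h (by decide); rw [e] at h3; exact absurd h3 (by decide)
          simp [h1, h2, h3, h4, hns, hne, hnr, pv_take3_ne_task seg]

lemma pvFoldA_eq (segs : List (List Char)) : ∀ a b c d : Option (List Char),
    segs.foldl pvAStep [a, b, c, d] =
      [segs.foldl (pvKeyStep "sub".toList) a, segs.foldl (pvKeyStep "ses".toList) b,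
       segs.foldl (pvKeyStep "task".toList) c, segs.foldl (pvKeyStep "run".toList) d] := by
  induction segs with
  | nil => intro a b c d; rfl
  | cons s t ih =>
    intro a b c d
    simp only [List.foldl_cons, pvAStep_eq]
    exact ih _ _ _ _

-- ===== VERDICT (by name: the statement is the Claim_ definition above) =====
theorem filename2tuple_spec : Claim_equal_filename2tuple := by
  intro fname _
  show filename2tuple fname = filename2tuple_alt fname
  unfold filename2tuple filename2tuple_alt pvLastMatch
  simp only [show (List.replicate 4 (none : Option (List Char))) = [none, none, none, none] from rfl,
    pvFoldA_eq]
  rfl
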